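-- pv_equiv track=rewrite | github.com/feamando/pmos | plugins/pm-os-cce/tools/feature/bidirectional_sync.py | _derive_status_from_tracks
-- ===== SOURCE A (Python) =====
-- from typing import Any, Dict, List, Optional, Tuple
--
-- def _derive_status_from_tracks(state_data: Dict[str, Any]) -> str:
--     """Derive status from track completion states (PRD C.5 rule)."""
--     engine = state_data.get("engine", {})
--     tracks = engine.get("tracks", {})
--
--     if not tracks:
--         return "To Do"
--
--     statuses = [track.get("status", "not_started") for track in tracks.values()]
--
--     if all(s == "complete" for s in statuses):
--         return "Done"
--
--     if any(
--         s in ("in_progress", "pending_input", "pending_approval") for s in statuses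
--     ):
--         return "In Progress"
--
--     return "To Do"
-- ===== SOURCE B (Python) =====
-- _RANK = {"complete": 0, "in_progress": 2, "pending_input": 2, "pending_approval": 2}
-- _LABEL = {0: "Done", 1: "To Do", 2: "In Progress"}
--
-- def _derive_status_from_tracks(state_data):
--     """Classify by max severity: complete->0, active->2, anything else->1;
--     the aggregate status is the label of the worst (maximum) rank."""
--     tracks = state_data.get("engine", {}).get("tracks", {})
--     if not tracks:
--         return "To Do"
--     worst = max(_RANK.get(t.get("status", "not_started"), 1) for t in tracks.values())
--     return _LABEL[worst]
-- ===== Notes on version B (the rewrite author's own statement) =====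
-- stated objective: alternative
-- what changed: Replaces A's boolean all()/any() classification with a max-severity computation: each status is mapped through a rank table (complete->0, active->2, other->1), the maximum rank is taken, and the result is read from a label table.
import Mathlib
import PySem

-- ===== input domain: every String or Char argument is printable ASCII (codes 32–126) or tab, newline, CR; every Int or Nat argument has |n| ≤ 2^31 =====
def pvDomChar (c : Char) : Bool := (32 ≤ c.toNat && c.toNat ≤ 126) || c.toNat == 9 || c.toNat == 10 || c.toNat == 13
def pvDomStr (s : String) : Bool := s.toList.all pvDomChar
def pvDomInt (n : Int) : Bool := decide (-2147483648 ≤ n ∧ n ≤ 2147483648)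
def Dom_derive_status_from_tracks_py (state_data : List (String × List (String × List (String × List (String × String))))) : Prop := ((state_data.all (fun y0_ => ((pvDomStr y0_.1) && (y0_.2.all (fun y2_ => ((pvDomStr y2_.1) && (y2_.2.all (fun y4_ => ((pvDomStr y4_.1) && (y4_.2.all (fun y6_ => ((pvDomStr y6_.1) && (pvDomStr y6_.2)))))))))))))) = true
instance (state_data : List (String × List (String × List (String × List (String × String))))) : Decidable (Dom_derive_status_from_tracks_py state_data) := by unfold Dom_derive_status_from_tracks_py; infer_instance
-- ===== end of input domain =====

-- B replaces A's all()/any() boolean classification by a max-severity ranking (rank table + max + label table): an alternative decomposition, same cost.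


-- ===== PORT A =====
def derive_status_from_tracks_py (state_data : List (String × List (String × List (String × List (String × String))))) : String :=
  let engine := (PySem.Dict.ofList state_data).getD "engine" []
  let tracks := (PySem.Dict.ofList engine).getD "tracks" []
  if tracks = [] then "To Do"
  else
    let statuses := (PySem.Dict.ofList tracks).values.map
      (fun track => (PySem.Dict.ofList track).getD "status" "not_started")
    if statuses.all (fun s => s == "complete") then "Done"
    else if statuses.any (fun s => s == "in_progress" || s == "pending_input" || s == "pending_approval") then "In Progress"
    else "To Do"

-- ===== PORT B =====
-- _RANK.get(status, 1) from Source B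
def pvRank (s : String) : Nat :=
  (PySem.Dict.ofList [("complete", 0), ("in_progress", 2), ("pending_input", 2), ("pending_approval", 2)]).getD s 1

def derive_status_from_tracks_py_alt (state_data : List (String × List (String × List (String × List (String × String))))) : String :=
  let tracks := (PySem.Dict.ofList ((PySem.Dict.ofList state_data).getD "engine" [])).getD "tracks" []
  if tracks = [] then "To Do"
  else
    let ranks := (PySem.Dict.ofList tracks).values.map
      (fun t => pvRank ((PySem.Dict.ofList t).getD "status" "not_started"))
    -- max(...) over Source B's generator; the [] branch is unreachable (tracks ≠ [])
    let worst := match ranks with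
      | [] => 0
      | r :: rs => rs.foldl max r
    -- _LABEL[worst]: worst ∈ {0,1,2}, so the lookup always succeeds and "" is unreachable
    match (PySem.Dict.ofList [(0, "Done"), (1, "To Do"), (2, "In Progress")]).get? worst with
    | some l => l
    | none => ""

-- ===== PRECONDITION & SPEC =====
def Spec_derive_status_from_tracks_py (state_data : List (String × List (String × List (String × List (String × String))))) (out : String) : Prop := out = derive_status_from_tracks_py_alt state_data
instance (state_data : List (String × List (String × List (String × List (String × String))))) (out : String) : Decidable (Spec_derive_status_from_tracks_py state_data out) := by unfold Spec_derive_status_from_tracks_py; infer_instance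

-- ===== CLAIM (what is proved, stated in full; the proofs are below) =====
def Claim_equal_derive_status_from_tracks_py : Prop := ∀ (state_data : List (String × List (String × List (String × List (String × String))))), Dom_derive_status_from_tracks_py state_data → Spec_derive_status_from_tracks_py state_data (derive_status_from_tracks_py state_data)

-- ===== LEMMAS AND PROOFS =====
-- the rank table, as a branch on the status string
theorem pvRank_eq (s : String) : pvRank s =
    if s == "complete" then 0
    else if (s == "in_progress" || s == "pending_input" || s == "pending_approval") then 2 else 1 := by
  simp only [pvRank, PySem.Dict.ofList, PySem.Dict.update, List.foldl]
  simp [PySem.Dict.getD_insert]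
  split_ifs <;> simp_all

theorem pv_foldl_max_acc (rs : List Nat) (r : Nat) : rs.foldl max r = max r (rs.foldl max 0) := by
  induction rs generalizing r with
  | nil => simp
  | cons x xs ih => simp only [List.foldl_cons]; rw [ih, ih (max 0 x)]; omega

-- the worst rank of a status list
def pvWorst (l : List String) : Nat := (l.map pvRank).foldl max 0

-- B's head-seeded max equals the 0-seeded fold
theorem pv_match_eq (l : List String) :
    (match l.map pvRank with | [] => 0 | r :: rs => rs.foldl max r) = pvWorst l := by
  unfold pvWorst
  cases l.map pvRank with
  | nil => simp
  | cons r rs => simp only [List.foldl_cons, Nat.zero_max]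

theorem pv_worst_cons (s : String) (t : List String) :
    pvWorst (s :: t) = max (pvRank s) (pvWorst t) := by
  simp only [pvWorst, List.map_cons, List.foldl_cons]
  rw [pv_foldl_max_acc]
  omega

theorem pv_worst_le (l : List String) : pvWorst l ≤ 2 := by
  induction l with
  | nil => simp [pvWorst]
  | cons s t ih =>
    rw [pv_worst_cons, pvRank_eq]
    split_ifs <;> omega

-- the worst rank classifies exactly as A's all()/any() tests
theorem pv_worst_eq (l : List String) :
    pvWorst l = (if l.all (fun s => s == "complete") then 0
       else if l.any (fun s => s == "in_progress" || s == "pending_input" || s == "pending_approval") then 2 else 1) := by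
  induction l with
  | nil => simp [pvWorst]
  | cons s t ih =>
    rw [pv_worst_cons, pvRank_eq, ih]
    have hle := pv_worst_le t
    simp only [List.all_cons, List.any_cons]
    by_cases hc : s = "complete" <;>
      by_cases ha : (s = "in_progress" ∨ s = "pending_input" ∨ s = "pending_approval") <;>
      by_cases h1 : t.all (fun s => s == "complete") = true <;>
      by_cases h2 : t.any (fun s => s == "in_progress" || s == "pending_input" || s == "pending_approval") = true <;>
      simp_all <;> (try omega) <;> (split_ifs <;> simp_all) <;>
      (obtain ⟨x, hx, hact⟩ := ‹∃ x ∈ t, (x = "in_progress" ∨ x = "pending_input") ∨ x = "pending_approval"›;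
       have hcx := ‹∀ x ∈ t, x = "complete"› x hx; subst hcx; simp_all)

-- ===== VERDICT (by name: the statement is the Claim_ definition above) =====
theorem derive_status_from_tracks_py_spec : Claim_equal_derive_status_from_tracks_py := by
  intro state_data _
  unfold Spec_derive_status_from_tracks_py derive_status_from_tracks_py derive_status_from_tracks_py_alt
  dsimp only
  split
  · rfl
  · have hmap : ∀ (vs : List (List (String × String))),
        vs.map (fun t => pvRank ((PySem.Dict.ofList t).getD "status" "not_started"))
          = (vs.map (fun t => (PySem.Dict.ofList t).getD "status" "not_started")).map pvRank := by
      intro vs; rw [List.map_map]; rfl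
    rw [hmap, pv_match_eq, pv_worst_eq]
    split_ifs <;> rfl
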